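-- pv_equiv track=rewrite | github.com/Avi-Xccelerate-CA/ca-dataeng-cohort-7-python1-KeithChong2008 | week0.py | dose
-- ===== SOURCE A (Python) =====
-- import math
--
-- def dose(needs):
--     total = sum(needs)
--     if total >= 500:
--         return "No medicine given"
--     ##
--
--     treatment = []
--     for need in needs:
--         if(need >250):
--             return "No medicine given"
--         round_up = math.ceil(need/10) * 10
--         vitamins = round_up /10
--         injections = round_up - need
--         treatment.append((math.ceil(vitamins), injections))
--
--     return treatment
-- ===== SOURCE B (Python) =====
-- def dose(needs):
--     # refuse up front: total too high, or the largest need too high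
--     if sum(needs) >= 500 or (needs and max(needs) > 250):
--         return "No medicine given"
--     return _build(needs)
--
-- def _build(needs):
--     # recursive construction; per-element dose via integer divmod, no floats
--     if not needs:
--         return []
--     q, r = divmod(needs[0], 10)
--     head = (q + 1, 10 - r) if r else (q, 0)
--     return [head] + _build(needs[1:])
-- ===== Notes on version B (the rewrite author's own statement) =====
-- stated objective: alternative
-- what changed: A validates while building in one interleaved loop with float ceil arithmetic; B refuses via an up-front sum/max guard and then builds the list by structural recursion using integer divmod (q,r) instead of math.ceil on floats.
-- outside the precondition, e.g. on dose([600]): A returns 'No medicine given', B returns 'No medicine given'; on dose([300]): A returns 'No medicine given', B returns 'No medicine given'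
import Mathlib
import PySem

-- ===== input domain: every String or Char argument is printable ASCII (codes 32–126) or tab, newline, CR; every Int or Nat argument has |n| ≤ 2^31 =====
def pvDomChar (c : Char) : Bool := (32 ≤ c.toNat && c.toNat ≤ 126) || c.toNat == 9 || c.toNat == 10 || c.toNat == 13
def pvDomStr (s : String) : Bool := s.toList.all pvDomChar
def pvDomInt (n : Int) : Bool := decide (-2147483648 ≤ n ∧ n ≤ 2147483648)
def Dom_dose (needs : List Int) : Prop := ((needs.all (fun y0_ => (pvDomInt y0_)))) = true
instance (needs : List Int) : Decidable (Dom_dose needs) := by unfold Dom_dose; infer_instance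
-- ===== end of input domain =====

-- B replaces A's interleaved validate-while-building float-ceil loop by an up-front sum/max guard
-- plus a structural recursion computing each dose from integer divmod; proved equal on Pre_
-- (the inputs where A returns a list rather than the refusal string).


-- ===== PORT A =====
-- math.ceil(x/10) on ints is exact ceiling division: -((-x) // 10)
-- A's for-loop with its early return ("No medicine given", outside Pre_, rendered as [])
def doseLoopA : List Int → List (Int × Int) → List (Int × Int)
  | [], treatment => treatment
  | need :: rest, treatment =>
    if need > 250 then []  -- Python returns the string "No medicine given" here (excluded by Pre_)
    else
      let round_up := (-(PySem.Int.floordiv (-need) 10)) * 10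
      let vitamins := -(PySem.Int.floordiv (-round_up) 10)  -- math.ceil(round_up / 10), exact on Dom
      let injections := round_up - need
      doseLoopA rest (treatment ++ [(vitamins, injections)])

def dose (needs : List Int) : List (Int × Int) :=
  if needs.sum ≥ 500 then []  -- Python returns the string "No medicine given" here (excluded by Pre_)
  else doseLoopA needs []

-- ===== PORT B =====
-- _build in Source B: structural recursion, per-element dose via divmod(need, 10)
def doseBuild : List Int → List (Int × Int)
  | [] => []
  | need :: rest =>
    let q := PySem.Int.floordiv need 10
    let r := PySem.Int.mod need 10
    (if r ≠ 0 then (q + 1, 10 - r) else (q, 0)) :: doseBuild rest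

def dose_alt (needs : List Int) : List (Int × Int) :=
  if needs.sum ≥ 500 ∨ (needs ≠ [] ∧ (PySem.List.max? needs (fun x => x)).getD 0 > 250)
  then []  -- the refusal string "No medicine given" (excluded by Pre_)
  else doseBuild needs

-- ===== PRECONDITION & SPEC =====
-- Pre_ excludes exactly the inputs (total ≥ 500, or some element > 250) on which A returns the
-- string "No medicine given", which is not a value of the declared list-of-pairs type.
def Pre_dose (needs : List Int) : Prop :=
  needs.sum < 500 ∧ needs.all (fun n => n ≤ 250) = true
instance (needs : List Int) : Decidable (Pre_dose needs) := by unfold Pre_dose; infer_instance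
def pvWitness_dose : List Int := [7, 15, -3]

def Spec_dose (needs : List Int) (out : List (Int × Int)) : Prop := out = dose_alt needs
instance (needs : List Int) (out : List (Int × Int)) : Decidable (Spec_dose needs out) := by unfold Spec_dose; infer_instance

-- ===== CLAIM (what is proved, stated in full; the proofs are below) =====
def Claim_equal_dose : Prop := ∀ (needs : List Int), Dom_dose needs → Pre_dose needs → Spec_dose needs (dose needs)

-- ===== LEMMAS AND PROOFS =====

-- A's per-element pair (ceiling division) equals B's divmod pair
theorem pair_eq (n : Int) :
    (let round_up := (-(PySem.Int.floordiv (-n) 10)) * 10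
     ((-(PySem.Int.floordiv (-round_up) 10)), round_up - n))
    = (let q := PySem.Int.floordiv n 10
       let r := PySem.Int.mod n 10
       if r ≠ 0 then (q + 1, 10 - r) else (q, 0)) := by
  have hq := PySem.Int.floordiv_mul_add_mod n 10
  have hm : PySem.Int.mod n 10 = n % 10 := PySem.Int.mod_eq_emod_of_pos (by omega)
  have hr0 : 0 ≤ n % 10 := Int.emod_nonneg n (by omega)
  have hr1 : n % 10 < 10 := Int.emod_lt_of_pos n (by omega)
  set q := PySem.Int.floordiv n 10 with hqdef
  set r := PySem.Int.mod n 10 with hrdef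
  have hceil : -(PySem.Int.floordiv (-n) 10) = if r = 0 then q else q + 1 := by
    rw [PySem.Int.neg_floordiv_neg_eq_iff_of_pos (by omega)]
    split_ifs with h0 <;> omega
  by_cases h0 : r = 0
  · have hru : (-(PySem.Int.floordiv (-n) 10)) * 10 = q * 10 := by rw [hceil]; simp [h0]
    simp only [hru, if_neg (by simp [h0] : ¬ r ≠ 0)]
    have hc : -(PySem.Int.floordiv (-(q * 10)) 10) = q := by
      rw [PySem.Int.neg_floordiv_neg_eq_iff_of_pos (by omega)]; omega
    simp only [hc, Prod.mk.injEq]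
    exact ⟨trivial, by omega⟩
  · have hru : (-(PySem.Int.floordiv (-n) 10)) * 10 = (q + 1) * 10 := by rw [hceil]; simp [h0]
    simp only [hru, if_pos (by simpa using h0 : r ≠ 0)]
    have hc : -(PySem.Int.floordiv (-((q + 1) * 10)) 10) = q + 1 := by
      rw [PySem.Int.neg_floordiv_neg_eq_iff_of_pos (by omega)]; omega
    simp only [hc, Prod.mk.injEq]
    exact ⟨trivial, by omega⟩

theorem doseLoopA_eq (rest : List Int) (acc : List (Int × Int))
    (h : ∀ n ∈ rest, n ≤ 250) :
    doseLoopA rest acc = acc ++ doseBuild rest := by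
  induction rest generalizing acc with
  | nil => simp [doseLoopA, doseBuild]
  | cons n t ih =>
    have hn : ¬ n > 250 := by have := h n (by simp); omega
    simp only [doseLoopA, if_neg hn, doseBuild]
    rw [ih _ (fun m hm => h m (by simp [hm]))]
    have := pair_eq n
    simp only at this
    rw [List.append_assoc, List.singleton_append, this]

-- ===== VERDICT (by name: the statement is the Claim_ definition above) =====
theorem dose_spec : Claim_equal_dose := by
  intro needs _ hpre
  obtain ⟨hsum, hall⟩ := hpre
  unfold Spec_dose dose dose_alt
  have hle : ∀ n ∈ needs, n ≤ 250 := by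
    intro n hn; have := List.all_eq_true.mp hall n hn; simpa using this
  have hguard : ¬ (needs.sum ≥ 500 ∨ (needs ≠ [] ∧ (PySem.List.max? needs (fun x => x)).getD 0 > 250)) := by
    push Not
    refine ⟨by omega, fun hne => ?_⟩
    cases hmx : PySem.List.max? needs (fun x => x) with
    | none => simp
    | some m =>
      have := PySem.List.max?_mem hmx
      simp only [Option.getD_some]
      have := hle m this
      omega
  rw [if_neg (by omega), if_neg hguard, doseLoopA_eq needs [] hle]
  simp
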